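-- pv_equiv track=rewrite | github.com/johndoe31415/x509sak | x509sak/estimate/Judgement.py | _minof
-- ===== SOURCE A (Python) =====
-- def _minof(items):
-- 	result = None
-- 	for item in items:
-- 		if result is None:
-- 			result = item
-- 		elif item is not None:
-- 			result = min(result, item)
-- 	return result
-- ===== SOURCE B (Python) =====
-- def _minof(items):
-- 	vals = [x for x in items if x is not None]
-- 	return min(vals) if vals else None
-- ===== Notes on version B (the rewrite author's own statement) =====
-- stated objective: idiomatic
-- what changed: Replaces the interleaved filter-and-fold with a two-phase form: first materialize the non-None values, then one library min over them.
import Mathlib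
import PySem

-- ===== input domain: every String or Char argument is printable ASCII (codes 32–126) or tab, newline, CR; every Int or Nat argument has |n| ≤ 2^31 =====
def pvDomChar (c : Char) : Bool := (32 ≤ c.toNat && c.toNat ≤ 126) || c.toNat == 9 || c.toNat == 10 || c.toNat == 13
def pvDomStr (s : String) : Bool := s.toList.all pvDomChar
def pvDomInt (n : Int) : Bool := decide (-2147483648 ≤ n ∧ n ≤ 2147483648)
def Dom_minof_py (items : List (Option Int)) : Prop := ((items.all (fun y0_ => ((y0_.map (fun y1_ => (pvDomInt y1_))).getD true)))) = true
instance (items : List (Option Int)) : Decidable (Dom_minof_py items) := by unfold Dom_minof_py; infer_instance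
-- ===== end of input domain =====

-- B restructures A's interleaved filter-and-fold as filter-then-library-min (idiomatic); return values are proved equal.

-- ===== PORT A =====
-- literal transliteration of A's loop over `items` with mutable `result`
def minof_py (items : List (Option Int)) : Option Int :=
  items.foldl
    (fun result item =>
      if result = none then item
      else if item ≠ none then some (min (result.getD 0) (item.getD 0))
      else result)
    none

-- ===== PORT B =====
-- vals = [x for x in items if x is not None]; min(vals) if vals else None
def minof_py_alt (items : List (Option Int)) : Option Int :=
  let vals := items.filterMap id
  match vals with
  | [] => none
  | v :: vs => some (vs.foldl min v)   -- Python's min over a nonempty int list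

-- ===== PRECONDITION & SPEC =====
def Spec_minof_py (items : List (Option Int)) (out : Option Int) : Prop := out = minof_py_alt items
instance (items : List (Option Int)) (out : Option Int) : Decidable (Spec_minof_py items out) := by unfold Spec_minof_py; infer_instance

-- ===== CLAIM (what is proved, stated in full; the proofs are below) =====
def Claim_equal_minof_py : Prop := ∀ (items : List (Option Int)), Dom_minof_py items → Spec_minof_py items (minof_py items)

-- ===== LEMMAS AND PROOFS =====

-- Invariant: once the accumulator is `some r`, A's fold computes the min of r and all later non-None values.
theorem minof_step_some (items : List (Option Int)) : ∀ (r : Int),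
    items.foldl
      (fun result item =>
        if result = none then item
        else if item ≠ none then some (min (result.getD 0) (item.getD 0))
        else result)
      (some r)
    = some ((items.filterMap id).foldl min r) := by
  induction items with
  | nil => intro r; rfl
  | cons x xs ih =>
    intro r
    cases x with
    | none =>
      rw [List.filterMap_cons]
      exact ih r
    | some v =>
      rw [List.filterMap_cons]
      exact ih (min r v)

theorem minof_from_none (items : List (Option Int)) :
    minof_py items = minof_py_alt items := by
  cases items with
  | nil => rfl
  | cons x xs =>
    cases x with
    | none =>
      induction xs with
      | nil => rfl
      | cons y ys ih =>
        cases y with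
        | none => exact ih
        | some v =>
          show List.foldl _ (some v) ys = _
          rw [minof_step_some]
          rfl
    | some v =>
      show List.foldl _ (some v) xs = _
      rw [minof_step_some]
      rfl

-- ===== VERDICT (by name: the statement is the Claim_ definition above) =====
theorem minof_py_spec : Claim_equal_minof_py := by
  intro items _
  exact minof_from_none items
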